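-- pv_equiv track=rewrite | github.com/dongmeixu/Algorithm | leetcode/2017_摩拜_1_字符串问题.py | solve
-- ===== SOURCE A (Python) =====
-- def solve(s1, s2):
--     n1 = len(s1)
--     n2 = len(s2)
--
--     result = 0
--     equal = 0
--     if n1 == n2:  # 当两个字符串长度一致时
--         for i in range(n1):
--             if s1[i] == s2[i]:
--                 equal += 1
--         return equal
--     else:
--         assert n1 < n2
--         for i in range(n2 - n1 + 1):
--             k = i
--             for j in range(n1):
--                 if s2[k] == s1[j]:
--                     equal += 1
--
--                 k += 1
--             result = max(result, equal)
--             equal = 0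
--     return n2 - (result + (n2 - n1))
-- ===== SOURCE B (Python) =====
-- def solve(s1, s2):
--     n1, n2 = len(s1), len(s2)
--     maxd = n2 - n1
--     # index the positions of each character of s1 once
--     pos = {}
--     for j, c in enumerate(s1):
--         pos.setdefault(c, []).append(j)
--     # histogram of match counts per shift: each matching character pair (i, j)
--     # with a valid shift d = i - j contributes one match to window d
--     cnt = {}
--     for i, c in enumerate(s2):
--         for j in pos.get(c, ()):
--             d = i - j
--             if 0 <= d <= maxd:
--                 cnt[d] = cnt.get(d, 0) + 1
--     if n1 == n2:
--         return cnt.get(0, 0)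
--     best = max(cnt.get(d, 0) for d in range(maxd + 1))
--     return n1 - best
-- ===== Notes on version B (the rewrite author's own statement) =====
-- stated objective: alternative
-- what changed: Replaces A's per-window rescans with a shift-histogram algorithm: a dict indexes the positions of every character of s1, one pass over s2 looks up the matching positions and increments a counter keyed by the shift i-j, and one max over the counter replaces A's window loops (the final n2-(result+(n2-n1)) becomes n1-best); it trades A's fixed window cost for cost proportional to the number of matching character pairs, so it is slower on match-dense inputs.
-- outside the precondition, e.g. on solve('abc', 'ab'): A raises AssertionError, B raises ValueError
import Mathlib
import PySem

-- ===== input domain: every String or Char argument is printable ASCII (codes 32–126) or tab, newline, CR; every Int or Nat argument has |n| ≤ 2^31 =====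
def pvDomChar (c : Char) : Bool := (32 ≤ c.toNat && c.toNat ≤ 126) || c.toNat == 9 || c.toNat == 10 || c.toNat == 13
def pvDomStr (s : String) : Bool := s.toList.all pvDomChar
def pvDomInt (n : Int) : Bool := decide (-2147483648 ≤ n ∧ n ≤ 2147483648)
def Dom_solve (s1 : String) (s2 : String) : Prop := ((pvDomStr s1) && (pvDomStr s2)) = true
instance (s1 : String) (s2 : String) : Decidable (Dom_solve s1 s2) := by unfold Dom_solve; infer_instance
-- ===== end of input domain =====

-- B replaces A's per-window rescans by a shift histogram: a dict of s1's character positions,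
-- one pass over s2 incrementing a counter keyed by the shift i-j, then one max; objective: alternative.


-- ===== PORT A =====
def solve (s1 : String) (s2 : String) : Int :=
  let l1 := s1.toList
  let l2 := s2.toList
  let n1 : Int := PySem.Str.len s1
  let n2 : Int := PySem.Str.len s2
  if n1 = n2 then
    (PySem.List.pyRange 0 n1 1).foldl
      (fun equal i =>
        if PySem.List.pyGetD l1 i ' ' = PySem.List.pyGetD l2 i ' ' then equal + 1 else equal)
      0
  else
    -- assert n1 < n2  (AssertionError when n1 > n2: excluded by Pre_solve)
    let st :=
      (PySem.List.pyRange 0 (n2 - n1 + 1) 1).foldl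
        (fun (st : Int × Int) i =>
          let inner :=
            (PySem.List.pyRange 0 n1 1).foldl
              (fun (st2 : Int × Int) j =>
                (if PySem.List.pyGetD l2 st2.2 ' ' = PySem.List.pyGetD l1 j ' '
                 then st2.1 + 1 else st2.1, st2.2 + 1))
              (st.2, i)
          (max st.1 inner.1, 0))
        (0, 0)
    n2 - (st.1 + (n2 - n1))

-- ===== PORT B =====
def solve_alt (s1 : String) (s2 : String) : Int :=
  let l1 := s1.toList
  let l2 := s2.toList
  let n1 : Int := PySem.Str.len s1
  let n2 : Int := PySem.Str.len s2
  let maxd := n2 - n1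
  -- pos: for j, c in enumerate(s1): pos.setdefault(c, []).append(j)
  let pos : PySem.Dict Char (List Int) :=
    (PySem.List.enumerate l1).foldl
      (fun d p => d.modify p.2 [] (· ++ [p.1])) PySem.Dict.empty
  -- cnt: for i, c in enumerate(s2): for j in pos.get(c, ()): d = i-j; if 0<=d<=maxd: cnt[d]=cnt.get(d,0)+1
  let cnt : PySem.Dict Int Int :=
    (PySem.List.enumerate l2).foldl
      (fun cnt p =>
        (pos.getD p.2 []).foldl
          (fun cnt j =>
            let d := p.1 - j
            if 0 ≤ d ∧ d ≤ maxd then cnt.insert d (cnt.getD d 0 + 1) else cnt)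
          cnt)
      PySem.Dict.empty
  if n1 = n2 then cnt.getD 0 0
  else
    -- max over the generator (raises ValueError when the range is empty: excluded by Pre_solve)
    let best := (PySem.List.max?
      ((PySem.List.pyRange 0 (maxd + 1) 1).map (fun d => cnt.getD d 0)) (fun x => x)).getD 0
    n1 - best

-- ===== PRECONDITION & SPEC =====
-- Pre_ excludes len(s1) > len(s2), where A raises AssertionError (and B's max() raises ValueError).
def Pre_solve (s1 : String) (s2 : String) : Prop :=
  PySem.Str.len s1 ≤ PySem.Str.len s2
instance (s1 : String) (s2 : String) : Decidable (Pre_solve s1 s2) := by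
  unfold Pre_solve; infer_instance

def pvWitness_solve : String × String := ("ab", "xaby")

def Spec_solve (s1 : String) (s2 : String) (out : Int) : Prop := out = solve_alt s1 s2
instance (s1 : String) (s2 : String) (out : Int) : Decidable (Spec_solve s1 s2 out) := by unfold Spec_solve; infer_instance

-- ===== CLAIM (what is proved, stated in full; the proofs are below) =====
def Claim_equal_solve : Prop := ∀ (s1 : String) (s2 : String), Dom_solve s1 s2 → Pre_solve s1 s2 → Spec_solve s1 s2 (solve s1 s2)

-- ===== LEMMAS AND PROOFS =====

-- number of positionwise matches between xs and ys (= B's per-shift histogram value, A's window count)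
def matchCount (xs ys : List Char) : Int :=
  ((xs.zip ys).map (fun p => if p.1 = p.2 then (1 : Int) else 0)).sum

theorem matchCount_nonneg (xs ys : List Char) : 0 ≤ matchCount xs ys := by
  unfold matchCount
  induction xs generalizing ys with
  | nil => simp
  | cons c t ih =>
    cases ys with
    | nil => simp
    | cons d u =>
      simp only [List.zip_cons_cons, List.map_cons, List.sum_cons]
      have := ih u
      split <;> omega

-- A's inner loop (running index k) counts matches of l1 against l2 shifted by i
theorem innerLoop_eq (l1 : List Char) (l2 : List Char) (i e : Int)
    (h0 : 0 ≤ i) (h : i + l1.length ≤ l2.length) :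
    l1.foldl
      (fun (st2 : Int × Int) c =>
        (if PySem.List.pyGetD l2 st2.2 ' ' = c then st2.1 + 1 else st2.1, st2.2 + 1))
      (e, i)
    = (e + matchCount l1 (l2.drop i.toNat), i + l1.length) := by
  induction l1 generalizing i e with
  | nil => simp [matchCount]
  | cons c t ih =>
    have hi : i.toNat < l2.length := by
      simp only [List.length_cons] at h; omega
    have hget : PySem.List.pyGetD l2 i ' ' = l2[i.toNat] :=
      PySem.List.pyGetD_eq_getElem _ _ h0 (by omega)
    have hdrop : l2.drop i.toNat = l2[i.toNat] :: l2.drop (i.toNat + 1) :=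
      List.drop_eq_getElem_cons hi
    have hih := ih (i + 1) (if l2[i.toNat] = c then e + 1 else e) (by omega)
      (by simp only [List.length_cons] at h; omega)
    have htn : (i + 1).toNat = i.toNat + 1 := by omega
    simp only [List.foldl_cons, hget, hih, htn, hdrop, matchCount, List.zip_cons_cons,
      List.map_cons, List.sum_cons, List.length_cons]
    rw [Prod.mk.injEq]
    constructor
    · by_cases hc : l2[i.toNat] = c
      · simp only [if_pos hc, if_pos hc.symm]; ring
      · rw [if_neg hc, if_neg (fun h => hc h.symm)]; ring
    · push_cast; ring

-- A's equal-length loop counts positionwise matches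
theorem eqLoop_eq (l1 l2 : List Char) (a e : Int) (h0 : 0 ≤ a)
    (hlen : l1.length = l2.length) :
    (PySem.List.pyRange a (l1.length : Int) 1).foldl
      (fun equal i =>
        if PySem.List.pyGetD l1 i ' ' = PySem.List.pyGetD l2 i ' ' then equal + 1 else equal)
      e
    = e + matchCount (l1.drop a.toNat) (l2.drop a.toNat) := by
  by_cases hab : a < (l1.length : Int)
  · rw [PySem.List.pyRange_one_cons hab]
    have hi1 : a.toNat < l1.length := by omega
    have hi2 : a.toNat < l2.length := by omega
    have hg1 : PySem.List.pyGetD l1 a ' ' = l1[a.toNat] :=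
      PySem.List.pyGetD_eq_getElem _ _ h0 (by omega)
    have hg2 : PySem.List.pyGetD l2 a ' ' = l2[a.toNat] :=
      PySem.List.pyGetD_eq_getElem _ _ h0 (by omega)
    have hrec := eqLoop_eq l1 l2 (a + 1)
      (if l1[a.toNat] = l2[a.toNat] then e + 1 else e) (by omega) hlen
    have htn : (a + 1).toNat = a.toNat + 1 := by omega
    have hd1 : l1.drop a.toNat = l1[a.toNat] :: l1.drop (a.toNat + 1) :=
      List.drop_eq_getElem_cons hi1
    have hd2 : l2.drop a.toNat = l2[a.toNat] :: l2.drop (a.toNat + 1) :=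
      List.drop_eq_getElem_cons hi2
    simp only [List.foldl_cons, hg1, hg2, hrec, htn, hd1, hd2, matchCount,
      List.zip_cons_cons, List.map_cons, List.sum_cons]
    split <;> ring
  · rw [PySem.List.pyRange_one_eq_nil (by omega)]
    have : l1.length ≤ a.toNat := by omega
    simp [List.drop_eq_nil_of_le this, matchCount]
termination_by (l1.length - a.toNat)
decreasing_by omega


theorem matchCount_eq_countP (xs ys : List Char) (t : Nat)
    (h : xs.length + t ≤ ys.length) :
    matchCount xs (ys.drop t)
      = ((List.range xs.length).countP
          (fun j => xs.getD j ' ' = ys.getD (j + t) ' ') : Int) := by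
  induction xs generalizing t with
  | nil => simp [matchCount]
  | cons c xs' ih =>
    have ht : t < ys.length := by simp at h; omega
    have hdrop : ys.drop t = ys[t] :: ys.drop (t + 1) := List.drop_eq_getElem_cons ht
    have hih := ih (t + 1) (by simp at h ⊢; omega)
    simp only [matchCount, hdrop, List.zip_cons_cons, List.map_cons, List.sum_cons,
      List.length_cons, List.range_succ_eq_map] at *
    rw [List.countP_cons, List.countP_map]
    have hc : ((fun j => decide ((c :: xs').getD j ' ' = ys.getD (j + t) ' ')) ∘ Nat.succ)
        = fun j => decide (xs'.getD j ' ' = ys.getD (j + (t+1)) ' ') := by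
      funext j
      have hjt : j + 1 + t = j + (t + 1) := by omega
      simp [Function.comp, Nat.succ_eq_add_one, hjt]
    rw [hc]
    push_cast
    rw [← hih]
    have hget : ys.getD (0 + t) ' ' = ys[t] := by simp [List.getD_eq_getElem, List.getElem?_eq_getElem ht]
    simp only [List.getD_cons_zero, hget]
    by_cases hcc : c = ys[t]
    · simp [hcc]; ring
    · simp [hcc]


theorem posGet (l1 : List Char) (c : Char) :
    ((PySem.List.enumerate l1).foldl
        (fun d p => d.modify p.2 [] (· ++ [p.1])) PySem.Dict.empty).getD c []
      = ((PySem.List.enumerate l1).filter (fun p => p.2 == c)).map (·.1) := by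
  have hmap : (PySem.List.enumerate l1).foldl
        (fun d p => d.modify p.2 [] (· ++ [p.1])) PySem.Dict.empty
      = ((PySem.List.enumerate l1).map (fun p => (p.2, p.1))).foldl
        (fun d q => d.modify q.1 [] (· ++ [q.2])) PySem.Dict.empty := by
    rw [List.foldl_map]
  rw [hmap, PySem.Dict.getD_foldl_modify_append]
  simp [PySem.Dict.getD_empty, List.filter_map, List.map_map, Function.comp_def]

theorem innerCnt (Q : Int → Prop) [DecidablePred Q] (k : Int → Int)
    (js : List Int) (c0 : PySem.Dict Int Int) (v : Int) :
    (js.foldl (fun cnt j => if Q j then cnt.insert (k j) (cnt.getD (k j) 0 + 1) else cnt) c0).getD v 0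
      = c0.getD v 0 + (js.countP (fun j => decide (Q j) && (k j == v)) : Int) := by
  induction js generalizing c0 with
  | nil => simp
  | cons j t ih =>
    simp only [List.foldl_cons, List.countP_cons]
    by_cases hq : Q j
    · rw [if_pos hq, ih, PySem.Dict.getD_insert]
      by_cases hk : k j = v
      · rw [if_pos hk.symm, hk]
        simp only [hq, decide_true, beq_self_eq_true, Bool.and_self, if_pos]
        push_cast; ring
      · rw [if_neg (fun h => hk h.symm)]
        simp [hq, hk]
    · rw [if_neg hq, ih]
      simp [hq]

theorem countP_range_fixed (n j0 : Nat) (b : Nat → Bool) :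
    (List.range n).countP (fun j => decide (j = j0) && b j)
      = if j0 < n ∧ b j0 then 1 else 0 := by
  induction n with
  | zero => simp
  | succ m ih =>
    rw [List.range_succ, List.countP_append, ih]
    simp only [List.countP_cons, List.countP_nil]
    by_cases h : m = j0
    · subst h
      by_cases hb : b m
      · simp [hb]
      · simp [hb]
    · by_cases h2 : j0 < m ∧ b j0
      · have : j0 < m + 1 ∧ b j0 = true := ⟨by omega, h2.2⟩
        simp [h, h2, this]
      · have : ¬ (j0 < m + 1 ∧ b j0 = true) := by
          rintro ⟨hlt, hb⟩; exact h2 ⟨by omega, hb⟩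
        simp [h, h2, this]
        intro hle
        have hlt : j0 < m := by omega
        cases hb : b j0
        · rfl
        · exact absurd ⟨hlt, hb⟩ h2

theorem countP_range_shift (t n1 n2 : Nat) (h : t + n1 ≤ n2) (p : Nat → Bool) :
    (List.range n2).countP (fun i => decide (t ≤ i) && decide (i < t + n1) && p i)
      = (List.range n1).countP (fun j => p (j + t)) := by
  obtain ⟨r, hr⟩ : ∃ r, n2 = (t + n1) + r := ⟨n2 - (t+n1), by omega⟩
  subst hr
  rw [List.range_add, List.countP_append, List.range_add, List.countP_append]
  rw [List.countP_map, List.countP_map]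
  have h1 : (List.range t).countP (fun i => decide (t ≤ i) && decide (i < t + n1) && p i) = 0 := by
    rw [List.countP_eq_zero]
    intro i hi
    simp only [List.mem_range] at hi
    simp [Nat.not_le.mpr hi]
  have h3 : (List.range r).countP ((fun i => decide (t ≤ i) && decide (i < t + n1) && p i) ∘ (t + n1 + ·)) = 0 := by
    rw [List.countP_eq_zero]
    intro i _
    simp [Function.comp]
  have h2 : (List.range n1).countP ((fun i => decide (t ≤ i) && decide (i < t + n1) && p i) ∘ (t + ·)) = (List.range n1).countP (fun j => p (j + t)) := by
    apply List.countP_congr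
    intro j hj
    simp only [List.mem_range] at hj
    have hlt : j + t < t + n1 := by omega
    simp [Function.comp, Nat.add_comm t j, hlt]
  rw [h1, h2, h3]; omega

theorem outerCnt (pos : PySem.Dict Char (List Int)) (maxd : Int)
    (pairs : List (Int × Char)) (c0 : PySem.Dict Int Int) (v : Int) :
    (pairs.foldl
        (fun cnt p =>
          (pos.getD p.2 []).foldl
            (fun cnt j =>
              if 0 ≤ p.1 - j ∧ p.1 - j ≤ maxd
              then cnt.insert (p.1 - j) (cnt.getD (p.1 - j) 0 + 1) else cnt)
            cnt)
        c0).getD v 0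
      = c0.getD v 0
        + (pairs.map (fun p =>
            ((pos.getD p.2 []).countP
              (fun j => decide (0 ≤ p.1 - j ∧ p.1 - j ≤ maxd) && (p.1 - j == v)) : Int))).sum := by
  induction pairs generalizing c0 with
  | nil => simp
  | cons p t ih =>
    simp only [List.foldl_cons, List.map_cons, List.sum_cons]
    rw [ih, innerCnt (fun j => 0 ≤ p.1 - j ∧ p.1 - j ≤ maxd) (fun j => p.1 - j)]
    ring

theorem cntVal (l1 l2 : List Char) (v : Int) (hv0 : 0 ≤ v)
    (hv : v + (l1.length : Int) ≤ (l2.length : Int)) :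
    ((PySem.List.enumerate l2).foldl
        (fun cnt p =>
          (((PySem.List.enumerate l1).foldl
              (fun d p => d.modify p.2 [] (· ++ [p.1])) PySem.Dict.empty).getD p.2 []).foldl
            (fun cnt j =>
              if 0 ≤ p.1 - j ∧ p.1 - j ≤ (l2.length : Int) - (l1.length : Int)
              then cnt.insert (p.1 - j) (cnt.getD (p.1 - j) 0 + 1) else cnt)
            cnt)
        (PySem.Dict.empty : PySem.Dict Int Int)).getD v 0
      = matchCount l1 (l2.drop v.toNat) := by
  set n1 := l1.length with hn1
  set n2 := l2.length with hn2
  set t := v.toNat with ht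
  have htn : t + n1 ≤ n2 := by omega
  set maxd : Int := (n2 : Int) - (n1 : Int) with hmaxd
  set pos := (PySem.List.enumerate l1).foldl
      (fun d p => d.modify p.2 [] (· ++ [p.1])) PySem.Dict.empty with hpos
  rw [outerCnt, PySem.Dict.getD_empty]
  -- per-pair count: positions of c in l1 with the right shift
  have hper : ∀ (i : Int) (c : Char),
      ((pos.getD c []).countP
          (fun j => decide (0 ≤ i - j ∧ i - j ≤ maxd) && (i - j == v)))
        = (List.range n1).countP
            (fun j => (l1.getD j ' ' == c)
              && (decide (0 ≤ i - (j:Int) ∧ i - (j:Int) ≤ maxd) && (i - (j:Int) == v))) := by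
    intro i c
    rw [hpos, posGet, List.countP_map, List.countP_filter,
      PySem.List.enumerate_eq_map_pyRange l1 ' ']
    rw [List.countP_map]
    have hr1 : PySem.List.pyRange 0 (PySem.List.len l1)
        = List.map (fun k : Nat => (k : Int)) (List.range n1) := by
      simp [PySem.List.len, PySem.List.pyRange_zero_natCast]
      rfl
    rw [hr1, List.countP_map]
    apply List.countP_congr
    intro j _
    simp [PySem.List.pyGetD_natCast, Bool.and_comm]
  -- evaluate the per-position count of s2
  have hx : ∀ x : Nat,
      ((List.range n1).countP
        (fun j => (l1.getD j ' ' == l2.getD x ' ')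
          && (decide (0 ≤ (x:Int) - (j:Int) ∧ (x:Int) - (j:Int) ≤ maxd) && ((x:Int) - (j:Int) == v)))
        : Int)
      = if (decide (t ≤ x) && decide (x < t + n1)
            && decide (l1.getD (x - t) ' ' = l2.getD x ' ')) then 1 else 0 := by
    intro x
    by_cases hxv : t ≤ x
    · have hcongr : ∀ j ∈ List.range n1,
          ((l1.getD j ' ' == l2.getD x ' ')
            && (decide (0 ≤ (x:Int) - (j:Int) ∧ (x:Int) - (j:Int) ≤ maxd) && ((x:Int) - (j:Int) == v))) = true
          ↔ (decide (j = x - t) && decide (l1.getD j ' ' = l2.getD x ' ')) = true := by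
        intro j hj
        by_cases hjj : j = x - t
        · subst hjj
          have h1 : (x : Int) - ((x - t : Nat) : Int) = v := by omega
          have hle : v ≤ maxd := by rw [hmaxd]; omega
          have h2 : (0 ≤ (x:Int) - ((x - t : Nat):Int) ∧ (x:Int) - ((x - t : Nat):Int) ≤ maxd) :=
            ⟨by omega, by rw [h1]; exact hle⟩
          by_cases hcc : l1.getD (x - t) ' ' = l2.getD x ' ' <;>
            simp [h1, h2, hcc, hv0, hle]
        · have h1 : ¬ ((x : Int) - (j : Int) = v) := by
            intro hc; apply hjj; omega
          simp [hjj, h1]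
      rw [List.countP_congr hcongr, countP_range_fixed]
      by_cases hcc : l1[x - t]?.getD ' ' = l2[x]?.getD ' '
      · by_cases hlt : x < t + n1
        · have h1 : x - t < n1 := by omega
          simp [hcc, hlt, hxv, h1]
        · have h1 : ¬ (x - t < n1) := by omega
          simp [hcc, hlt, h1]
      · simp [hcc]
    · have hz : (List.range n1).countP
          (fun j => (l1.getD j ' ' == l2.getD x ' ')
            && (decide (0 ≤ (x:Int) - (j:Int) ∧ (x:Int) - (j:Int) ≤ maxd) && ((x:Int) - (j:Int) == v))) = 0 := by
        rw [List.countP_eq_zero]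
        intro j _
        have : ¬ ((x:Int) - (j:Int) = v) := by omega
        simp [this]
      rw [hz]
      simp [hxv]
  -- rewrite the sum over s2's positions as a 0/1 indicator sum, then a countP
  rw [PySem.List.enumerate_eq_map_pyRange l2 ' ']
  have hr2 : PySem.List.pyRange 0 (PySem.List.len l2)
      = List.map (fun k : Nat => (k : Int)) (List.range n2) := by
    simp [PySem.List.len, PySem.List.pyRange_zero_natCast]
    rfl
  rw [hr2, List.map_map, List.map_map]
  have hcomp : (((fun p : Int × Char =>
        ((pos.getD p.2 []).countP
          (fun j => decide (0 ≤ p.1 - j ∧ p.1 - j ≤ maxd) && (p.1 - j == v)) : Int))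
      ∘ (fun j : Int => (j, PySem.List.pyGetD l2 j ' '))) ∘ (fun k : Nat => (k : Int)))
      = fun x : Nat =>
          if (decide (t ≤ x) && decide (x < t + n1)
              && decide (l1.getD (x - t) ' ' = l2.getD x ' ')) then (1:Int) else 0 := by
    funext x
    simp only [Function.comp_def]
    rw [hper, PySem.List.pyGetD_natCast]
    exact hx x
  rw [hcomp, PySem.List.sum_map_ite_one_zero, countP_range_shift t n1 n2 htn,
    matchCount_eq_countP l1 l2 t (by omega)]
  rw [zero_add]
  apply congrArg
  apply List.countP_congr
  intro j _
  have hjt : j + t - t = j := by omega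
  simp [hjt]


-- B's per-shift map over the valid shifts equals the window match counts
theorem mapB_eq (l1 l2 : List Char) (_h : (l1.length : Int) ≤ (l2.length : Int)) :
    (PySem.List.pyRange 0 ((l2.length : Int) - (l1.length : Int) + 1) 1).map
      (fun d => ((PySem.List.enumerate l2).foldl
        (fun cnt p =>
          (((PySem.List.enumerate l1).foldl
              (fun d p => d.modify p.2 [] (· ++ [p.1])) PySem.Dict.empty).getD p.2 []).foldl
            (fun cnt j =>
              if 0 ≤ p.1 - j ∧ p.1 - j ≤ (l2.length : Int) - (l1.length : Int)
              then cnt.insert (p.1 - j) (cnt.getD (p.1 - j) 0 + 1) else cnt)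
            cnt)
        (PySem.Dict.empty : PySem.Dict Int Int)).getD d 0)
      = (PySem.List.pyRange 0 ((l2.length : Int) - (l1.length : Int) + 1) 1).map
          (fun i => matchCount l1 (l2.drop i.toNat)) := by
  apply List.map_congr_left
  intro d hd
  rw [PySem.List.mem_pyRange_one] at hd
  exact cntVal l1 l2 d (by omega) (by omega)


-- ===== VERDICT (by name: the statement is the Claim_ definition above) =====
theorem solve_spec : Claim_equal_solve := by
  intro s1 s2 _ hpre
  unfold Pre_solve at hpre
  simp only [PySem.Str.len_eq] at hpre
  unfold Spec_solve solve solve_alt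
  simp only [PySem.Str.len_eq]
  by_cases heq : ((s1.toList.length : Int)) = ((s2.toList.length : Int))
  · rw [if_pos heq, if_pos heq]
    refine Eq.trans ?_ (cntVal s1.toList s2.toList 0 le_rfl (by omega)).symm
    have h := eqLoop_eq s1.toList s2.toList 0 0 le_rfl (by exact_mod_cast heq)
    simpa using h
  · rw [if_neg heq, if_neg heq]
    have hlt : (s1.toList.length : Int) < (s2.toList.length : Int) := lt_of_le_of_ne hpre heq
    set f : Int → Int := fun i => matchCount s1.toList (s2.toList.drop i.toNat) with hf
    -- A's inner loop at shift i counts matches against the window starting at i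
    have hinner : ∀ (e i : Int), 0 ≤ i → i + (s1.toList.length : Int) ≤ (s2.toList.length : Int) →
        (PySem.List.pyRange 0 ((s1.toList.length : Int)) 1).foldl
          (fun (st2 : Int × Int) j =>
            (if PySem.List.pyGetD s2.toList st2.2 ' ' = PySem.List.pyGetD s1.toList j ' '
             then st2.1 + 1 else st2.1, st2.2 + 1))
          (e, i) = (e + f i, i + (s1.toList.length : Int)) := by
      intro e i h0 h
      rw [PySem.List.foldl_pyRange_zero_pyGetD' s1.toList ' '
        (fun (st2 : Int × Int) c =>
          (if PySem.List.pyGetD s2.toList st2.2 ' ' = c then st2.1 + 1 else st2.1, st2.2 + 1)) (e, i)]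
      exact innerLoop_eq s1.toList s2.toList i e h0 (by exact_mod_cast h)
    -- A's outer loop is a running max of f over the shifts
    have houter : ∀ (L : List Int), (∀ i ∈ L, 0 ≤ i ∧ i + (s1.toList.length : Int) ≤ (s2.toList.length : Int)) →
        ∀ r : Int,
        L.foldl
          (fun (st : Int × Int) i =>
            (max st.1
              ((PySem.List.pyRange 0 ((s1.toList.length : Int)) 1).foldl
                (fun (st2 : Int × Int) j =>
                  (if PySem.List.pyGetD s2.toList st2.2 ' ' = PySem.List.pyGetD s1.toList j ' '
                   then st2.1 + 1 else st2.1, st2.2 + 1))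
                (st.2, i)).1, 0))
          (r, 0) = ((L.map f).foldl max r, 0) := by
      intro L
      induction L with
      | nil => intro _ r; simp
      | cons x t ih =>
        intro hmem r
        obtain ⟨hx0, hxb⟩ := hmem x List.mem_cons_self
        simp only [List.foldl_cons, List.map_cons,
          hinner 0 x hx0 hxb, zero_add]
        exact ih (fun i hi => hmem i (List.mem_cons_of_mem _ hi)) (max r (f x))
    have hmemR : ∀ i ∈ PySem.List.pyRange 0 ((s2.toList.length : Int) - (s1.toList.length : Int) + 1) 1,
        0 ≤ i ∧ i + (s1.toList.length : Int) ≤ (s2.toList.length : Int) := by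
      intro i hi
      rw [PySem.List.mem_pyRange_one] at hi
      omega
    rw [houter _ hmemR 0]
    -- B's histogram values at the valid shifts equal f there
    refine Eq.trans ?_
      (congrArg
        (fun L => ((s1.toList.length : Int)) - (PySem.List.max? L (fun x => x)).getD 0)
        (mapB_eq s1.toList s2.toList hpre).symm)
    -- both sides reduce to a running max over f 0 :: rest
    rw [PySem.List.pyRange_one_cons (by omega : (0:Int) < (s2.toList.length : Int) - (s1.toList.length : Int) + 1)]
    simp only [List.map_cons]
    rw [PySem.List.max?_id_cons]
    simp only [Option.getD_some]
    have h00 : max 0 (f 0) = f 0 := max_eq_right (matchCount_nonneg _ _)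
    simp only [List.foldl_cons, h00]
    ring
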